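-- pv_equiv track=rewrite | github.com/nyaw216/PenghitungBanyakKata | algorithms.py | count_keywords_recursive
-- ===== SOURCE A (Python) =====
-- def count_keywords_recursive(words, keywords, i):
-- # I.S terdefinisi array kata words yang sudah melalui pra-proses, array kata kunci keywords yang akan dihitung banyaknya, dan indeks i sebagai penunjuk posisi kata yang sedang diproses
-- # F.S mengembalikan bilangan bulat yang menyatakan total kemunculan seluruh kata kunci dalam keywords dengan pendekatan rekursif
--     if i == len(words):
--         return 0
--
--     j = 0
--     total = 0
--     while j < len(keywords):
--         if words[i] == keywords[j]:
--             total = 1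
--         j += 1
--
--     return total + count_keywords_recursive(words, keywords, i + 1)
-- ===== SOURCE B (Python) =====
-- def count_keywords_recursive(words, keywords, i):
--     total = 0
--     while i != len(words):
--         if words[i] in keywords:
--             total += 1
--         i += 1
--     return total
-- ===== Notes on version B (the rewrite author's own statement) =====
-- stated objective: simpler
-- what changed: Replaced A's recursion over the index plus an inner while-scan that sets a flag by a single flat iterative while-loop with an accumulator and a direct 'words[i] in keywords' membership test.
-- outside the precondition, e.g. on count_keywords_recursive(['a'], [], -5): A returns 0, B raises IndexError
import Mathlib
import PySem

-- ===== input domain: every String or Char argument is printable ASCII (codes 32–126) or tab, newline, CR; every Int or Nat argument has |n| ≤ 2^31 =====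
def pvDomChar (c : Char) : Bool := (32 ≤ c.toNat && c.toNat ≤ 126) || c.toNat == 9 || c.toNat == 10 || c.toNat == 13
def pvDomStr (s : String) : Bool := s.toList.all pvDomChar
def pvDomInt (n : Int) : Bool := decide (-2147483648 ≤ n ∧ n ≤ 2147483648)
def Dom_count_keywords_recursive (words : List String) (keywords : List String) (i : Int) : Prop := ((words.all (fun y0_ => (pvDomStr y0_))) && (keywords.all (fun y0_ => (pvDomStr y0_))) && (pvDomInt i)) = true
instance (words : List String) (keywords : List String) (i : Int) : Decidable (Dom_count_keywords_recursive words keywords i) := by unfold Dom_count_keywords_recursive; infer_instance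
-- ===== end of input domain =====

-- B replaces A's recursion-over-index (with its inner while-scan setting a flag) by a flat
-- iterative loop with an accumulator and a direct membership test; objective: simpler, not faster.

-- ===== PORT A =====
-- Port of A: recursion from i up to len(words); the inner 'while j < len(keywords)' flag loop
-- is transliterated as a fold over keywords carrying 'total'.  Where Python would raise
-- IndexError (pyGet? = none) the port returns 0 (junk; such inputs are outside Pre_).
def count_keywords_recursive (words : List String) (keywords : List String) (i : Int) : Int :=
  if i = (words.length : Int) then 0
  else if h : PySem.Raise.InRange words.length i then
    -- words[i]; in range by h (the dite guard only makes the recursion total)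
    let w := PySem.List.pyGetD words i ""
    let total : Int := keywords.foldl (fun t k => if w = k then 1 else t) 0
    total + count_keywords_recursive words keywords (i + 1)
  else 0  -- Python raises IndexError here (keywords ≠ []) or recurses forever (keywords = [])
termination_by ((words.length : Int) + 1 - i).toNat
decreasing_by
  unfold PySem.Raise.InRange at h
  omega

-- ===== PORT B =====
-- Port of B: tail-recursive loop 'while i != len(words)' with accumulator 'total';
-- same junk value (the accumulator) where Python raises IndexError, outside Pre_.
def cgo (words : List String) (keywords : List String) (i : Int) (total : Int) : Int :=
  if i = (words.length : Int) then total
  else if h : PySem.Raise.InRange words.length i then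
    cgo words keywords (i + 1)
      (total + if keywords.contains (PySem.List.pyGetD words i "") then 1 else 0)
  else total  -- Python raises IndexError here
termination_by ((words.length : Int) + 1 - i).toNat
decreasing_by
  unfold PySem.Raise.InRange at h
  omega

def count_keywords_recursive_alt (words : List String) (keywords : List String) (i : Int) : Int :=
  cgo words keywords i 0

-- ===== PRECONDITION & SPEC =====
-- Pre_ excludes (a) inputs where A raises (i > len(words); i < -len(words) with keywords ≠ [];
-- RecursionError/IndexError), and (b) i < -len(words) with keywords = [], where A accidentally
-- returns 0 because its empty inner loop never evaluates words[i], while B's natural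
-- 'words[i] in keywords' raises IndexError there.
def Pre_count_keywords_recursive (words : List String) (keywords : List String) (i : Int) : Prop :=
  -(words.length : Int) ≤ i ∧ i ≤ (words.length : Int)
instance (words : List String) (keywords : List String) (i : Int) : Decidable (Pre_count_keywords_recursive words keywords i) := by unfold Pre_count_keywords_recursive; infer_instance
def pvWitness_count_keywords_recursive : List String × List String × Int := (["a"], ["a"], 0)

def Spec_count_keywords_recursive (words : List String) (keywords : List String) (i : Int) (out : Int) : Prop := out = count_keywords_recursive_alt words keywords i
instance (words : List String) (keywords : List String) (i : Int) (out : Int) : Decidable (Spec_count_keywords_recursive words keywords i out) := by unfold Spec_count_keywords_recursive; infer_instance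

-- ===== CLAIM (what is proved, stated in full; the proofs are below) =====
def Claim_equal_count_keywords_recursive : Prop := ∀ (words : List String) (keywords : List String) (i : Int), Dom_count_keywords_recursive words keywords i → Pre_count_keywords_recursive words keywords i → Spec_count_keywords_recursive words keywords i (count_keywords_recursive words keywords i)

-- ===== LEMMAS AND PROOFS =====

-- A's inner flag loop computes 1 iff w occurs in keywords, else returns the initial accumulator.
theorem flag_fold_eq (w : String) (keywords : List String) (t : Int) :
    keywords.foldl (fun t k => if w = k then 1 else t) t
      = if keywords.contains w then 1 else t := by
  induction keywords generalizing t with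
  | nil => simp
  | cons k ks ih =>
    rw [List.foldl_cons, ih]
    by_cases h : w = k <;> simp [h]

-- Loop invariant: B's accumulator loop equals the accumulator plus A's recursion,
-- for any in-range i.
theorem cgo_eq (words keywords : List String) (i total : Int)
    (h1 : -(words.length : Int) ≤ i) (h2 : i ≤ (words.length : Int)) :
    cgo words keywords i total = total + count_keywords_recursive words keywords i := by
  unfold cgo count_keywords_recursive
  by_cases hi : i = (words.length : Int)
  · simp [hi]
  · have hlt : i < (words.length : Int) := lt_of_le_of_ne h2 hi
    have hin : PySem.Raise.InRange words.length i := by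
      unfold PySem.Raise.InRange; omega
    rw [if_neg hi, if_neg hi, dif_pos hin, dif_pos hin]
    rw [cgo_eq words keywords (i + 1) _ (by omega) (by omega)]
    simp only [flag_fold_eq]
    ring
termination_by ((words.length : Int) + 1 - i).toNat
decreasing_by omega

-- ===== VERDICT (by name: the statement is the Claim_ definition above) =====
theorem count_keywords_recursive_spec : Claim_equal_count_keywords_recursive := by
  intro words keywords i _ hpre
  unfold Spec_count_keywords_recursive count_keywords_recursive_alt
  rw [cgo_eq words keywords i 0 hpre.1 hpre.2, zero_add]
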